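/- GENERATED by farm/mkstatement.py from design/units.tsv (unit `sift_down`) and the Specs of Vorbis/Spec/*.lean — do not edit.
   THE STATEMENT of the proof unit `sift_down`: the function `sift_down` (55 instructions) satisfies its contract,
   given the contracts of its callees. What the names mean: Vorbis/Spec/Basic.lean. The theorem to prove:
   `theorem sift_down_ok : Vorbis.Spec.sift_down.Statement`. -/
import Vorbis.Spec.LibcSort
namespace Vorbis.Spec.sift_down
open X86 X86.User Asan

/-- The statement of unit `sift_down`. -/
def Statement : Prop :=
  ∀ (Lay : Layout) (_hLay : Lay.hi = 0x1000000) (μ : Microarch) (_hμ : UserX.MicroOK μ) (u₀ : State)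
    (_hcode : HasCodeNat Lay u₀ Vorbis.L.sift_down.entry Vorbis.Code.code_sift_down.nat Vorbis.L.sift_down.size)
    (_h_swap_bytes : ∀ (others : List Obj) (frames : List (Nat × FrameLayout)), Calls Lay μ Vorbis.WayInv (Vorbis.conv u₀) Vorbis.L.swap_bytes.entry (Vorbis.Spec.swap_bytes.spec others frames)),
    ∀ (others : List Obj) (frames : List (Nat × FrameLayout)) (cmp : Word) (w : Nat), Vorbis.Spec.CmpSpec Lay μ u₀ others frames cmp w → Calls Lay μ Vorbis.WayInv (Vorbis.conv u₀) Vorbis.L.sift_down.entry (Vorbis.Spec.sift_down.spec others frames cmp w)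

end Vorbis.Spec.sift_down
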